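-- pv_equiv track=rewrite | github.com/gloom2003/dou_ban_Top250 | movieTop250/main.py | get_min_country
-- ===== SOURCE A (Python) =====
-- from collections import Counter
--
-- def find_min_frequent_strings(strings):
--     # 使用Counter来计数,计算字符串列表中每个字符串出现的次数
--     counter = Counter(strings)
--     # 找到出现次数最少的字符串和次数
--     return counter.most_common()[-1]
--
-- def get_min_country(dicts):
--     countrys = []
--     for dict in dicts:
--         country = dict.get("country")
--         # 处理格式
--         str_list = country.split(" ")
--         for str in str_list:
--             countrys.append(str)
--     return find_min_frequent_strings(countrys)
-- ===== SOURCE B (Python) =====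
-- def get_min_country(dicts):
--     counts = {}
--     for d in dicts:
--         for tok in d.get("country").split(" "):
--             counts[tok] = counts.get(tok, 0) + 1
--     best = None
--     for k, c in counts.items():
--         if best is None or c <= best[1]:
--             best = (k, c)
--     return best
-- ===== Notes on version B (the rewrite author's own statement) =====
-- stated objective: alternative
-- what changed: B counts tokens in a single insertion-ordered dict as it scans and then finds the last minimal-count item with one linear pass using <=, instead of A's build-a-token-list + Counter + full stable descending sort read at index [-1].
import Mathlib
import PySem

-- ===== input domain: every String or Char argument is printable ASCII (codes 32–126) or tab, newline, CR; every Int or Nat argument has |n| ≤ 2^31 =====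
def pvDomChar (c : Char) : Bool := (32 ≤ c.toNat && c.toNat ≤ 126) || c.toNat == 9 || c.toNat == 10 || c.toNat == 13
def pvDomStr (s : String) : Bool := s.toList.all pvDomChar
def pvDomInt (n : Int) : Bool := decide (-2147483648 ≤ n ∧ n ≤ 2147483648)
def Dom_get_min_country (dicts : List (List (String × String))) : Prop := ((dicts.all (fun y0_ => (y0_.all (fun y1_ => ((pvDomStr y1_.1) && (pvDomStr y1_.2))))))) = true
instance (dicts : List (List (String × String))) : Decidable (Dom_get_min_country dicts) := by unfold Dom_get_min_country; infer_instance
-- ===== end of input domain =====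

-- B replaces A's token list + Counter + full descending sort with a single counting
-- dict built on the fly and one linear min-scan over its items (objective: alternative).

-- ===== PORT A =====
-- Counter(strings).most_common()[-1]: most_common() is the stable descending sort of the
-- counter's items by count; [-1] is ported as pyGetD … (-1) (IndexError excluded by Pre_).
def find_min_frequent_strings (strings : List String) : String × Int :=
  let counter := PySem.Dict.counter strings
  PySem.List.pyGetD (PySem.List.sorted counter.items (fun kv => kv.2) true) (-1) ("", 0)

def get_min_country (dicts : List (List (String × String))) : String × Int :=
  let countrys := dicts.foldl (fun acc d =>
    let country := ((PySem.Dict.mk d).get? "country").getD ""   -- .get("country"); None (AttributeError on .split) excluded by Pre_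
    let str_list := (PySem.Str.split? country " ").getD []      -- sep " " ≠ "": split? is never none
    str_list.foldl (fun a s => a ++ [s]) acc) []
  find_min_frequent_strings countrys

-- ===== PORT B =====
def get_min_country_alt (dicts : List (List (String × String))) : String × Int :=
  let counts := dicts.foldl (fun c d =>
    ((PySem.Str.split? (((PySem.Dict.mk d).get? "country").getD "") " ").getD []).foldl
      (fun c tok => c.insert tok (c.getD tok 0 + 1)) c) (PySem.Dict.empty : PySem.Dict String Int)
  let best := counts.items.foldl (fun (b : Option (String × Int)) kv =>
    match b with
    | none => some kv
    | some p => if kv.2 ≤ p.2 then some kv else some p) none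
  best.getD ("", 0)   -- best is None only for empty input (excluded by Pre_), where Python B returns None

-- ===== PRECONDITION & SPEC =====
-- Pre_ excludes exactly the inputs on which A raises: empty dicts (IndexError from
-- most_common()[-1]) and a dict without a "country" key (AttributeError on None.split).
def Pre_get_min_country (dicts : List (List (String × String))) : Prop :=
  dicts ≠ [] ∧ ∀ d ∈ dicts, ((PySem.Dict.mk d).get? "country").isSome = true
instance (dicts : List (List (String × String))) : Decidable (Pre_get_min_country dicts) := by unfold Pre_get_min_country; infer_instance
def pvWitness_get_min_country : (List (List (String × String))) := [[("country", "US China")], [("country", "US")]]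
def Spec_get_min_country (dicts : List (List (String × String))) (out : String × Int) : Prop := out = get_min_country_alt dicts
instance (dicts : List (List (String × String))) (out : String × Int) : Decidable (Spec_get_min_country dicts out) := by unfold Spec_get_min_country; infer_instance

-- ===== CLAIM (what is proved, stated in full; the proofs are below) =====
def Claim_equal_get_min_country : Prop := ∀ (dicts : List (List (String × String))), Dom_get_min_country dicts → Pre_get_min_country dicts → Spec_get_min_country dicts (get_min_country dicts)

-- ===== LEMMAS AND PROOFS =====

-- the tokens one movie dict contributes, and B's min-scan step
def pvTok (d : List (String × String)) : List String :=
  (PySem.Str.split? (((PySem.Dict.mk d).get? "country").getD "") " ").getD []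

def pvStep (b : Option (String × Int)) (kv : String × Int) : Option (String × Int) :=
  match b with
  | none => some kv
  | some p => if kv.2 ≤ p.2 then some kv else some p

theorem splitOn_go_ne_nil (sep : List Char) (fuel : Nat) (l cur : List Char)
    (acc : List (List Char)) : PySem.Chars.splitOn.go sep fuel l cur acc ≠ [] := by
  induction fuel generalizing l cur acc with
  | zero => simp [PySem.Chars.splitOn.go]
  | succ fuel ih =>
    cases l with
    | nil => simp [PySem.Chars.splitOn.go]
    | cons c rest =>
      rw [PySem.Chars.splitOn.go]
      split
      · exact ih _ _ _
      · exact ih _ _ _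

theorem pvTok_ne_nil (d : List (String × String)) : pvTok d ≠ [] := by
  unfold pvTok
  simp [PySem.Str.split?, PySem.Chars.split?, PySem.Chars.splitOn]
  exact splitOn_go_ne_nil _ _ _ _ _

theorem insertBy_ne_nil {α : Type} (before : α → α → Bool) (x : α) (ys : List α) :
    PySem.List.insertBy before x ys ≠ [] := by
  cases ys with
  | nil => simp [PySem.List.insertBy]
  | cons y t => rw [PySem.List.insertBy]; split <;> simp

-- inserting x into a descending-by-count list changes the last element exactly as B's scan step does
theorem getLast?_insertBy_desc (x : String × Int) (ys : List (String × Int))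
    (h : ys.Pairwise (fun a b => b.2 ≤ a.2)) :
    (PySem.List.insertBy (fun a b => decide (b.2 < a.2)) x ys).getLast? = pvStep ys.getLast? x := by
  induction ys with
  | nil => simp [PySem.List.insertBy, pvStep]
  | cons y t ih =>
    rcases List.pairwise_cons.mp h with ⟨hy, ht⟩
    rw [PySem.List.insertBy]
    by_cases hlt : y.2 < x.2
    · rw [if_pos (by simp [hlt])]
      have hg : (y :: t).getLast? = some ((y :: t).getLast (by simp)) :=
        List.getLast?_eq_some_getLast (by simp)
      have hle : ((y :: t).getLast (by simp)).2 ≤ y.2 := by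
        rcases List.mem_cons.mp (List.getLast_mem (l := y :: t) (by simp)) with heq | hmem'
        · rw [heq]
        · exact hy _ hmem'
      rw [List.getLast?_cons_cons, hg, pvStep, if_neg (by omega)]
    · rw [if_neg (by simp [hlt])]
      cases t with
      | nil =>
        have hxy : x.2 ≤ y.2 := by omega
        simp [PySem.List.insertBy, pvStep, hxy]
      | cons z t' =>
        have hstep : (y :: PySem.List.insertBy (fun a b => decide (b.2 < a.2)) x (z :: t')).getLast?
            = (PySem.List.insertBy (fun a b => decide (b.2 < a.2)) x (z :: t')).getLast? := by
          cases hcase : PySem.List.insertBy (fun a b => decide (b.2 < a.2)) x (z :: t') with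
          | nil => exact absurd hcase (insertBy_ne_nil _ _ _)
          | cons w ws => rw [List.getLast?_cons_cons]
        rw [hstep, ih ht, List.getLast?_cons_cons]

-- last of the stable descending sort = B's linear min-scan
theorem getLast?_sorted_rev_eq_foldl (l : List (String × Int)) :
    (PySem.List.sorted l (fun kv => kv.2) true).getLast? = l.foldl pvStep none := by
  induction l using List.reverseRecOn with
  | nil => simp [PySem.List.sorted_rev_eq_foldl_insertBy]
  | append_singleton l x ih =>
    rw [PySem.List.sorted_rev_eq_foldl_insertBy, List.foldl_append, List.foldl_append,
        ← PySem.List.sorted_rev_eq_foldl_insertBy]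
    simp only [List.foldl_cons, List.foldl_nil]
    rw [getLast?_insertBy_desc x _ (PySem.List.sorted_pairwise_rev l _), ih]

theorem get_min_country_eq_alt (dicts : List (List (String × String)))
    (hpre : Pre_get_min_country dicts) :
    get_min_country dicts = get_min_country_alt dicts := by
  obtain ⟨hne, -⟩ := hpre
  simp only [get_min_country, get_min_country_alt, find_min_frequent_strings]
  -- A's flat token list
  have hflat : dicts.foldl (fun acc d => (pvTok d).foldl (fun a s => a ++ [s]) acc) []
      = dicts.flatMap pvTok := by
    simp only [PySem.List.foldl_append_singleton]
    simpa using PySem.List.foldl_append_eq_flatMap pvTok dicts []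
  rw [show (fun (acc : List String) (d : List (String × String)) =>
      ((PySem.Str.split? (((PySem.Dict.mk d).get? "country").getD "") " ").getD []).foldl
        (fun a s => a ++ [s]) acc) = fun acc d => (pvTok d).foldl (fun a s => a ++ [s]) acc from rfl,
     hflat]
  -- B's counting dict is the Counter of that flat list
  have hcnt : dicts.foldl (fun c d =>
      (pvTok d).foldl (fun c tok => c.insert tok (c.getD tok 0 + 1)) c)
        (PySem.Dict.empty : PySem.Dict String Int)
      = PySem.Dict.counter (dicts.flatMap pvTok) := by
    rw [← PySem.Dict.foldl_insert_getD_add_one_eq_counter, List.foldl_flatMap]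
  rw [show (fun (c : PySem.Dict String Int) (d : List (String × String)) =>
      ((PySem.Str.split? (((PySem.Dict.mk d).get? "country").getD "") " ").getD []).foldl
        (fun c tok => c.insert tok (c.getD tok 0 + 1)) c)
      = fun c d => (pvTok d).foldl (fun c tok => c.insert tok (c.getD tok 0 + 1)) c from rfl,
     hcnt]
  -- the flat token list, hence the counter's items and their sort, are nonempty
  have htne : dicts.flatMap pvTok ≠ [] := by
    cases dicts with
    | nil => exact absurd rfl hne
    | cons d ds =>
      simp only [List.flatMap_cons, ne_eq, List.append_eq_nil_iff, not_and]
      intro h; exact absurd h (pvTok_ne_nil d)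
  have hitems : (PySem.Dict.counter (dicts.flatMap pvTok)).items ≠ [] := by
    rw [PySem.Dict.items_counter]
    obtain ⟨t, ts, hc⟩ := List.exists_cons_of_ne_nil htne
    have hmem : t ∈ PySem.Set.ofList (dicts.flatMap pvTok) := by
      rw [PySem.Set.mem_ofList, hc]; exact List.mem_cons_self
    intro hmap
    rw [List.map_eq_nil_iff] at hmap
    rw [hmap] at hmem
    exact absurd hmem List.not_mem_nil
  have hsne : PySem.List.sorted (PySem.Dict.counter (dicts.flatMap pvTok)).items
      (fun kv => kv.2) true ≠ [] := by
    rw [ne_eq, PySem.List.sorted_eq_nil_iff]; exact hitems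
  rw [PySem.List.pyGetD_neg_one _ _ hsne]
  have hlast := getLast?_sorted_rev_eq_foldl (PySem.Dict.counter (dicts.flatMap pvTok)).items
  rw [List.getLast?_eq_some_getLast hsne] at hlast
  rw [show ((PySem.Dict.counter (dicts.flatMap pvTok)).items.foldl
      (fun (b : Option (String × Int)) kv =>
        match b with
        | none => some kv
        | some p => if kv.2 ≤ p.2 then some kv else some p) none)
      = (PySem.Dict.counter (dicts.flatMap pvTok)).items.foldl pvStep none from rfl,
     ← hlast]
  rfl

-- ===== VERDICT (by name: the statement is the Claim_ definition above) =====
theorem get_min_country_spec : Claim_equal_get_min_country := by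
  intro dicts _ hpre
  unfold Spec_get_min_country
  exact get_min_country_eq_alt dicts hpre
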